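-- pv_equiv track=rewrite | github.com/mmore500/hstrat-surface-concept | implemented_pseudocode/steady_time_lookup.py | steady_lookup_impl
-- ===== SOURCE A (Python) =====
-- import typing
--
-- def steady_lookup_impl(S: int, T: int) -> typing.Iterable[int]:
--     """Implementation detail for `steady_time_lookup`."""
--     assert T >= S - 1  # T <= S redirected to T = S - 1 by steady_time_lookup
--     s = S.bit_length() - 1
--     t = (T + 1).bit_length() - s  # Current epoch
--
--     b = 0  # Bunch physical index (left-to right)
--     b_prime = 1  # Countdown on segments traversed within bunch
--     b_star = True  # Have traversed all segments in bunch?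
--     g_prime = s  # Countdown on sites traversed within segment
--     h_ = None  # Candidate hanoi value
--
--     for k in range(S - 1):  # Iterate over buffer sites, except unused last one
--         # Calculate info about current segment...
--         w = s - b  # Number of sites in current segment (i.e., segment size)
--         g = (1 << b) - b_prime  # Calc left-to-right index of current segment
--         h_max = t + w - 1  # Max possible hanoi value in segment during epoch
--
--         # Calculate candidate hanoi value...
--         _h0, h_ = h_, h_max - (h_max + g_prime) % w
--         assert (_h0 == h_) or b_star  # Can skip h calc if b_star is False...
--         del _h0  # ... i.e., skip calc within each bunch [[see below]]
--
--         # Decode ingest time of assigned h.v. from segment index g, ...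
--         # ... i.e., how many instances of that h.v. seen before
--         T_bar_ = (2 * g + 1) * (1 << h_) - 1  # Guess ingest time
--         epsilon_h = (T_bar_ >= T) * w  # Correction on h.v. if not yet seen
--         h = h_ - epsilon_h  # Corrected true resident h.v.
--         T_bar = (2 * g + 1) * (1 << (h_ - epsilon_h)) - 1  # True ingest time
--         yield T_bar
--
--         # Update within-segment state for next site...
--         g_prime = (g_prime or w) - 1  # Bump to next site within segment
--
--         # Update h for next site...
--         # ... only needed if not calculating h fresh every iter [[see above]]
--         h_ += 1 - (h_ >= h_max) * w
--
--         # Update within-bunch state for next site...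
--         b_prime -= not g_prime  # Bump to next segment within bunch
--         b_star = not (b_prime or g_prime)  # Should bump to next bunch?
--         b += b_star  # Do bump to next bunch, if any
--         # Set within-bunch segment countdown, if bumping to next bunch
--         b_prime = b_prime or (1 << b - 1)
-- ===== SOURCE B (Python) =====
-- import typing
--
-- def steady_lookup_impl(S: int, T: int) -> typing.Iterable[int]:
--     """Implementation detail for `steady_time_lookup`."""
--     assert T >= S - 1
--     if S < 2:
--         return
--     s = S.bit_length() - 1
--     t = (T + 1).bit_length() - s  # Current epoch
--     for b in range(s):  # Bunch physical index (left to right)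
--         w = s - b  # Segment size within this bunch
--         h_max = t + w - 1  # Max possible hanoi value in segment during epoch
--         for g in range((1 << b) >> 1, 1 << b):  # Global segment index
--             for i in range(w):  # Site offset within segment
--                 h = h_max - (h_max - i) % w  # Candidate hanoi value
--                 if (2 * g + 1) * (1 << h) - 1 >= T:  # Not yet seen this epoch
--                     h -= w
--                 yield (2 * g + 1) * (1 << h) - 1  # True ingest time
-- ===== Notes on version B (the rewrite author's own statement) =====
-- stated objective: simpler
-- what changed: Replaced the cross-iteration state machine (mutable b/b_prime/b_star/g_prime/h_ with countdowns, carries and an incremental h update) by three plain nested loops over bunches, segments and within-segment offsets that compute each ingest time directly from the loop indices.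
import Mathlib
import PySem

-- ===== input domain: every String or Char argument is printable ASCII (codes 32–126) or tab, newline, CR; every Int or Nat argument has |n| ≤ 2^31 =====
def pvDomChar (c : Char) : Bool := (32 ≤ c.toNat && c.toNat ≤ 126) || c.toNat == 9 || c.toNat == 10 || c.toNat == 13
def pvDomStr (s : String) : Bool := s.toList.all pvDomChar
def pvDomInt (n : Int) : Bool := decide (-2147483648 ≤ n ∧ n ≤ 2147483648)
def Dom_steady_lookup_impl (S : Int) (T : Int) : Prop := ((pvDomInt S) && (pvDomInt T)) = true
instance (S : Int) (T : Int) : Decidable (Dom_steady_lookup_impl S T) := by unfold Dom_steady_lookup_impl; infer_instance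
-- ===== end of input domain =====

-- B replaces A's cross-iteration state machine by three plain nested loops (bunch/segment/offset)
-- computing each yielded value directly from the loop indices; equal output, no speed claim.
-- Both A and B are generators; the equivalence is about the list of yielded values.

-- ===== PORT A =====
-- Loop state of A: b, b_prime, b_star, g_prime, h_, and the list of yielded values.
-- h_ starts as Python None; it is only ever read by A's internal `assert` (a no-op when it
-- passes; it cannot fire before h_ is first assigned), so it is ported with initial value 0.
structure StA where
  b : Int
  bp : Int
  bs : Bool
  gp : Int
  hh : Int
  acc : List Int

-- One iteration of A's `for k in range(S - 1)` body (k itself is unused by the body).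
-- `1 << b` is ported as `(1:Int) <<< b.toNat`; b starts at 0 and is only incremented, so
-- b.toNat = b on every reachable state (Python would raise on a negative shift).
-- `1 << h` likewise: inside Pre_ the shift amounts stay nonnegative (checked by the tester).
def stepA (s t T : Int) (st : StA) : StA :=
  let w := s - st.b
  let g := ((1:Int) <<< st.b.toNat) - st.bp
  let h_max := t + w - 1
  let h_ := h_max - PySem.Int.mod (h_max + st.gp) w
  let T_bar_ := (2 * g + 1) * ((1:Int) <<< h_.toNat) - 1
  let epsilon_h := (if T ≤ T_bar_ then (1:Int) else 0) * w
  let h := h_ - epsilon_h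
  let T_bar := (2 * g + 1) * ((1:Int) <<< h.toNat) - 1
  let gp' := (if st.gp ≠ 0 then st.gp else w) - 1
  let h2 := h_ + (1 - (if h_max ≤ h_ then (1:Int) else 0) * w)
  let bp1 := st.bp - (if gp' = 0 then 1 else 0)
  let bs' := decide (bp1 = 0 ∧ gp' = 0)
  let b' := st.b + (if bs' then 1 else 0)
  let bp' := if bp1 ≠ 0 then bp1 else (1:Int) <<< (b' - 1).toNat
  ⟨b', bp', bs', gp', h2, st.acc ++ [T_bar]⟩

def steady_lookup_impl (S : Int) (T : Int) : List Int :=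
  let s : Int := (PySem.Int.bitLength S : Int) - 1
  let t : Int := (PySem.Int.bitLength (T + 1) : Int) - s
  ((PySem.List.pyRange 0 (S - 1) 1).foldl (fun st _ => stepA s t T st)
    ⟨0, 1, true, s, 0, []⟩).acc

-- ===== PORT B =====
def steady_lookup_impl_alt (S : Int) (T : Int) : List Int :=
  if S < 2 then []
  else
    let s : Int := (PySem.Int.bitLength S : Int) - 1
    let t : Int := (PySem.Int.bitLength (T + 1) : Int) - s
    (PySem.List.pyRange 0 s 1).foldl (fun acc b =>
      let w := s - b
      let h_max := t + w - 1
      (PySem.List.pyRange (((1:Int) <<< b.toNat) >>> (1:Nat)) ((1:Int) <<< b.toNat) 1).foldl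
        (fun acc2 g =>
          (PySem.List.pyRange 0 w 1).foldl (fun acc3 i =>
            let h_ := h_max - PySem.Int.mod (h_max - i) w
            let h := if T ≤ (2 * g + 1) * ((1:Int) <<< h_.toNat) - 1 then h_ - w else h_
            acc3 ++ [(2 * g + 1) * ((1:Int) <<< h.toNat) - 1]) acc2) acc) []

-- ===== PRECONDITION & SPEC =====
-- Pre_ excludes (a) T < S - 1, where A's assert raises AssertionError, and (b) S ≥ 2 not a
-- power of two, where A's `w = s - b` reaches 0 and `% w` raises ZeroDivisionError.
-- A returns normally exactly on Pre_ (the caller guarantees S a power of two).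
def Pre_steady_lookup_impl (S : Int) (T : Int) : Prop :=
  S - 1 ≤ T ∧ (S ≤ 1 ∨ S = (2:Int) ^ (Nat.log2 S.toNat))
instance (S : Int) (T : Int) : Decidable (Pre_steady_lookup_impl S T) := by
  unfold Pre_steady_lookup_impl; infer_instance
def pvWitness_steady_lookup_impl : Int × Int := (4, 10)

def Spec_steady_lookup_impl (S : Int) (T : Int) (out : List Int) : Prop :=
  out = steady_lookup_impl_alt S T
instance (S : Int) (T : Int) (out : List Int) : Decidable (Spec_steady_lookup_impl S T out) := by
  unfold Spec_steady_lookup_impl; infer_instance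

-- ===== CLAIM (what is proved, stated in full; the proofs are below) =====
def Claim_equal_steady_lookup_impl : Prop := ∀ (S : Int) (T : Int), Dom_steady_lookup_impl S T → Pre_steady_lookup_impl S T → Spec_steady_lookup_impl S T (steady_lookup_impl S T)

-- ===== LEMMAS AND PROOFS =====

-- the value B yields at bunch b, segment g, offset i (exactly B's inner-loop body)
def site (s t T b g i : Int) : Int :=
  let w := s - b
  let h_max := t + w - 1
  let h_ := h_max - PySem.Int.mod (h_max - i) w
  let h := if T ≤ (2 * g + 1) * ((1:Int) <<< h_.toNat) - 1 then h_ - w else h_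
  (2 * g + 1) * ((1:Int) <<< h.toNat) - 1

theorem mod_shift (a w gp i : Int) (hw : 0 < w) (Hgp : gp = w - i ∨ (gp = 0 ∧ i = 0)) :
    PySem.Int.mod (a + gp) w = PySem.Int.mod (a - i) w := by
  rcases Hgp with h | ⟨h, hi⟩
  · rw [PySem.Int.mod_eq_emod_of_pos hw, PySem.Int.mod_eq_emod_of_pos hw]
    have : a + gp = (a - i) + w * 1 := by omega
    rw [this, Int.add_mul_emod_self_left]
  · simp [h, hi]

theorem step_mid (s t T : Int) (bn : Nat) (g gp i : Int) (bs : Bool) (h0 : Int) (acc : List Int)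
    (hbs : (bn:Int) < s) (hi0 : 0 ≤ i) (hi1 : i + 1 < s - bn)
    (hg : g + 1 ≤ (1:Int) <<< bn)
    (Hgp : gp = s - bn - i ∨ (gp = 0 ∧ i = 0)) :
    ∃ h', stepA s t T ⟨bn, (1:Int) <<< bn - g, bs, gp, h0, acc⟩ =
      ⟨bn, (1:Int) <<< bn - g, false, s - bn - (i+1), h', acc ++ [site s t T bn g i]⟩ := by
  have hw : (0:Int) < s - bn := by omega
  refine ⟨?_, ?_⟩
  show stepA s t T _ = _
  unfold stepA site
  simp only [Int.toNat_natCast, sub_sub_cancel]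
  rw [mod_shift (t + (s - (bn:Int)) - 1) (s - bn) gp i hw (by tauto)]
  have hgp' : (if gp ≠ 0 then gp else s - (bn:Int)) - 1 = s - bn - (i+1) := by
    rcases Hgp with h | ⟨h, hi⟩ <;> subst h <;> split_ifs <;> omega
  rw [hgp']
  rw [if_neg (by omega : ¬ (s - (bn:Int) - (i+1) = 0))]
  simp only [sub_zero]
  have hbp : ¬ ((1:Int) <<< bn - g = 0) := by omega
  rw [if_pos hbp]
  have hdec : decide ((1:Int) <<< bn - g = 0 ∧ s - (bn:Int) - (i+1) = 0) = false := by
    simp; omega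
  rw [hdec]
  simp only [Bool.false_eq_true, if_false, StA.mk.injEq]
  refine ⟨by omega, trivial, trivial, trivial, ?_, ?_⟩
  · rfl
  · congr 2
    split_ifs <;> simp

theorem step_endseg (s t T : Int) (bn : Nat) (g gp i : Int) (bs : Bool) (h0 : Int) (acc : List Int)
    (hbs : (bn:Int) < s) (hi0 : 0 ≤ i) (hi1 : i + 1 = s - bn)
    (hg : g + 1 < (1:Int) <<< bn)
    (Hgp : gp = s - bn - i ∨ (gp = 0 ∧ i = 0)) :
    ∃ h', stepA s t T ⟨bn, (1:Int) <<< bn - g, bs, gp, h0, acc⟩ =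
      ⟨bn, (1:Int) <<< bn - (g+1), false, 0, h', acc ++ [site s t T bn g i]⟩ := by
  have hw : (0:Int) < s - bn := by omega
  refine ⟨?_, ?_⟩
  show stepA s t T _ = _
  unfold stepA site
  simp only [Int.toNat_natCast, sub_sub_cancel]
  rw [mod_shift (t + (s - (bn:Int)) - 1) (s - bn) gp i hw (by tauto)]
  have hgp' : (if gp ≠ 0 then gp else s - (bn:Int)) - 1 = 0 := by
    rcases Hgp with h | ⟨h, hi⟩ <;> subst h <;> split_ifs <;> omega
  rw [hgp']
  rw [if_pos rfl]
  have hbp : ¬ ((1:Int) <<< bn - g - 1 = 0) := by omega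
  have hdec : decide ((1:Int) <<< bn - g - 1 = 0 ∧ (0:Int) = 0) = false := by
    simp; omega
  rw [hdec]
  simp only [Bool.false_eq_true, if_false, StA.mk.injEq]
  refine ⟨by omega, by rw [if_pos hbp]; ring, trivial, trivial, ?_, ?_⟩
  · rfl
  · congr 2
    split_ifs <;> simp

theorem step_endbunch (s t T : Int) (bn : Nat) (g gp i : Int) (bs : Bool) (h0 : Int) (acc : List Int)
    (hbs : (bn:Int) < s) (hi0 : 0 ≤ i) (hi1 : i + 1 = s - bn)
    (hg : g + 1 = (1:Int) <<< bn)
    (Hgp : gp = s - bn - i ∨ (gp = 0 ∧ i = 0)) :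
    ∃ h', stepA s t T ⟨bn, (1:Int) <<< bn - g, bs, gp, h0, acc⟩ =
      ⟨(bn:Int) + 1, (1:Int) <<< bn, true, 0, h', acc ++ [site s t T bn g i]⟩ := by
  have hw : (0:Int) < s - bn := by omega
  refine ⟨?_, ?_⟩
  show stepA s t T _ = _
  unfold stepA site
  simp only [Int.toNat_natCast, sub_sub_cancel]
  rw [mod_shift (t + (s - (bn:Int)) - 1) (s - bn) gp i hw (by tauto)]
  have hgp' : (if gp ≠ 0 then gp else s - (bn:Int)) - 1 = 0 := by
    rcases Hgp with h | ⟨h, hi⟩ <;> subst h <;> split_ifs <;> omega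
  rw [hgp']
  rw [if_pos rfl]
  have hbp : (1:Int) <<< bn - g - 1 = 0 := by omega
  have hdec : decide ((1:Int) <<< bn - g - 1 = 0 ∧ (0:Int) = 0) = true := by
    simp; omega
  rw [hdec]
  simp only [if_true, StA.mk.injEq]
  refine ⟨trivial, ?_, trivial, trivial, ?_, ?_⟩
  · rw [if_neg (by omega)]
    norm_num
  · rfl
  · congr 2
    split_ifs <;> simp

def iterA (s t T : Int) : Nat → StA → StA
  | 0, st => st
  | n+1, st => iterA s t T n (stepA s t T st)

theorem segA (s t T : Int) (bn : Nat) (g : Int)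
    (hbs : (bn:Int) < s) (hg : g + 1 ≤ (1:Int) <<< bn) :
    ∀ (m : Nat), 1 ≤ m → (m:Int) ≤ s - bn →
    ∀ (gp : Int) (bs : Bool) (h0 : Int) (acc : List Int),
    (gp = (m:Int) ∨ (gp = 0 ∧ (m:Int) = s - bn)) →
    ∃ h' bs', iterA s t T m ⟨bn, (1:Int) <<< bn - g, bs, gp, h0, acc⟩ =
      ⟨if g + 1 = (1:Int) <<< bn then (bn:Int) + 1 else bn,
       if g + 1 = (1:Int) <<< bn then (1:Int) <<< bn else (1:Int) <<< bn - (g+1),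
       bs', 0, h',
       acc ++ (PySem.List.pyRange (s - bn - m) (s - bn) 1).map (site s t T bn g)⟩ := by
  intro m
  induction m with
  | zero => omega
  | succ m ih =>
    intro _ hmw gp bs h0 acc Hgp
    push_cast at hmw Hgp ⊢
    by_cases hm : m = 0
    · subst hm
      simp only [Nat.cast_zero, zero_add] at hmw Hgp ⊢
      have hlist : (PySem.List.pyRange (s - (bn:Int) - 1) (s - bn) 1).map (site s t T bn g)
          = [site s t T bn g (s - bn - 1)] := by
        rw [PySem.List.pyRange_one_cons (by omega), PySem.List.pyRange_one_eq_nil (by omega)]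
        rfl
      by_cases hE : g + 1 = (1:Int) <<< bn
      · obtain ⟨h', hstep⟩ := step_endbunch s t T bn g gp (s - bn - 1) bs h0 acc hbs
          (by omega) (by ring) hE (by omega)
        refine ⟨h', true, ?_⟩
        show stepA s t T _ = _
        rw [hstep, if_pos hE, if_pos hE, hlist]
      · obtain ⟨h', hstep⟩ := step_endseg s t T bn g gp (s - bn - 1) bs h0 acc hbs
          (by omega) (by ring) (by omega) (by omega)
        refine ⟨h', false, ?_⟩
        show stepA s t T _ = _
        rw [hstep, if_neg hE, if_neg hE, hlist]
    · have h1m : 1 ≤ m := by omega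
      obtain ⟨h', hstep⟩ := step_mid s t T bn g gp (s - bn - ((m:Int)+1)) bs h0 acc hbs
        (by omega) (by omega) hg (by omega)
      have hrw : iterA s t T (m+1) ⟨bn, (1:Int) <<< bn - g, bs, gp, h0, acc⟩
          = iterA s t T m (stepA s t T ⟨bn, (1:Int) <<< bn - g, bs, gp, h0, acc⟩) := rfl
      rw [hrw, hstep]
      have hgp2 : s - (bn:Int) - ((s - bn - ((m:Int)+1)) + 1) = (m:Int) := by ring
      rw [hgp2]
      obtain ⟨h2, bs2, hiter⟩ := ih h1m (by omega) (m:Int) false h'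
        (acc ++ [site s t T bn g (s - bn - ((m:Int)+1))]) (Or.inl rfl)
      refine ⟨h2, bs2, ?_⟩
      rw [hiter]
      have hcons : PySem.List.pyRange (s - (bn:Int) - ((m:Int)+1)) (s - bn) 1
          = (s - (bn:Int) - ((m:Int)+1)) :: PySem.List.pyRange (s - bn - m) (s - bn) 1 := by
        rw [PySem.List.pyRange_one_cons (by omega)]
        congr 2
        omega
      rw [hcons]
      simp [List.append_assoc]

theorem iterA_add (s t T : Int) (m n : Nat) (st : StA) :
    iterA s t T (m + n) st = iterA s t T n (iterA s t T m st) := by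
  induction m generalizing st with
  | zero => simp [iterA]
  | succ m ih => rw [Nat.succ_add]; exact ih (stepA s t T st)

theorem shl_one (n : Nat) : (1:Int) <<< n = ((2^n : Nat) : Int) := by simp [Int.shiftLeft_eq]

theorem bunchSegsA (s t T : Int) (bn : Nat) (hbs : (bn:Int) < s) :
    ∀ (c : Nat), 1 ≤ c →
    ∀ (g gp : Int) (bs : Bool) (h0 : Int) (acc : List Int),
    g = (1:Int) <<< bn - c →
    (gp = 0 ∨ gp = s - bn) →
    ∃ h' bs', iterA s t T (c * (s - (bn:Int)).toNat) ⟨bn, (1:Int) <<< bn - g, bs, gp, h0, acc⟩ =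
      ⟨(bn:Int) + 1, (1:Int) <<< bn, bs', 0, h',
       acc ++ (PySem.List.pyRange g ((1:Int) <<< bn) 1).flatMap
         (fun g' => (PySem.List.pyRange 0 (s - bn) 1).map (site s t T bn g'))⟩ := by
  intro c
  induction c with
  | zero => omega
  | succ c ih =>
    intro _ g gp bs h0 acc hgc Hgp
    push_cast at hgc
    have hwn : ((s - (bn:Int)).toNat : Int) = s - bn := by omega
    have hEpos : (0:Int) < (1:Int) <<< bn := by
      rw [shl_one]; positivity
    have hc0 : (0:Int) ≤ (c:Int) := by positivity
    have hgpm : gp = ((s - (bn:Int)).toNat : Int) ∨ (gp = 0 ∧ ((s - (bn:Int)).toNat : Int) = s - bn) := by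
      rcases Hgp with h | h
      · exact Or.inr ⟨h, hwn⟩
      · exact Or.inl (by omega)
    have hm1 : 1 ≤ (s - (bn:Int)).toNat := by omega
    have hm2 : (((s - (bn:Int)).toNat : Nat) : Int) ≤ s - (bn:Int) := by omega
    by_cases hc : c = 0
    · subst hc
      norm_num at hgc
      obtain ⟨h', bs', hiter⟩ := segA s t T bn g hbs (by linarith) (s - (bn:Int)).toNat
        hm1 hm2 gp bs h0 acc hgpm
      refine ⟨h', bs', ?_⟩
      rw [Nat.one_mul, hiter, if_pos (by linarith), if_pos (by linarith)]
      have hflat : PySem.List.pyRange g ((1:Int) <<< bn) 1 = [g] := by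
        rw [PySem.List.pyRange_one_cons (by linarith), PySem.List.pyRange_one_eq_nil (by linarith)]
      rw [hflat]
      simp only [List.flatMap_cons, List.flatMap_nil, List.append_nil]
      rw [show s - (bn:Int) - (((s - (bn:Int)).toNat : Nat) : Int) = 0 from by omega]
    · have hgE : g + 1 < (1:Int) <<< bn := by
        have : (1:Int) ≤ (c:Int) := by exact_mod_cast Nat.one_le_iff_ne_zero.mpr hc
        linarith
      obtain ⟨h', bs', hiter⟩ := segA s t T bn g hbs (by linarith) (s - (bn:Int)).toNat
        hm1 hm2 gp bs h0 acc hgpm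
      rw [if_neg (by linarith), if_neg (by linarith)] at hiter
      have hsplit : (c+1) * (s - (bn:Int)).toNat = (s - (bn:Int)).toNat + c * (s - (bn:Int)).toNat := by ring
      rw [hsplit, iterA_add, hiter]
      obtain ⟨h2, bs2, hiter2⟩ := ih (by omega) (g+1) 0 bs' h'
        (acc ++ (PySem.List.pyRange (s - (bn:Int) - (s - (bn:Int)).toNat) (s - bn) 1).map (site s t T bn g))
        (by push_cast; linarith) (Or.inl rfl)
      refine ⟨h2, bs2, ?_⟩
      rw [hiter2]
      have hcons : PySem.List.pyRange g ((1:Int) <<< bn) 1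
          = g :: PySem.List.pyRange (g+1) ((1:Int) <<< bn) 1 := by
        rw [PySem.List.pyRange_one_cons (by linarith)]
      rw [hcons]
      simp only [List.flatMap_cons, List.append_assoc, StA.mk.injEq]
      refine ⟨trivial, trivial, trivial, trivial, trivial, ?_⟩
      rw [show s - (bn:Int) - (((s - (bn:Int)).toNat : Nat) : Int) = 0 from by omega]

def cntB (b : Nat) : Nat := 2^b - 2^b/2
def totIter (sn : Nat) : Nat → Nat
  | 0 => 0
  | d+1 => cntB (sn - (d+1)) * (d+1) + totIter sn d

theorem totIter_closed (sn : Nat) : ∀ d, d < sn → totIter sn d = 2^(sn-1-d) * (2^(d+1) - (d+2)) := by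
  intro d
  induction d with
  | zero => simp [totIter]
  | succ d ih =>
    intro hd
    obtain ⟨e, he⟩ : ∃ e, sn = d + 2 + e := ⟨sn - (d+2), by omega⟩
    subst he
    have hcnt : cntB (d + 2 + e - (d+1)) = 2^e := by
      have h1 : d + 2 + e - (d+1) = e + 1 := by omega
      rw [h1]
      unfold cntB
      have : (2:Nat)^(e+1) = 2^e * 2 := pow_succ 2 e
      rw [this, Nat.mul_div_cancel _ (by norm_num)]
      omega
    have hih := ih (by omega)
    rw [show totIter (d+2+e) (d+1) = cntB (d + 2 + e - (d+1)) * (d+1) + totIter (d+2+e) d from rfl,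
        hih, hcnt]
    rw [show d + 2 + e - 1 - d = e + 1 from by omega, show d + 2 + e - 1 - (d+1) = e from by omega]
    have hb1 : d + 2 ≤ 2^(d+1) := Nat.lt_two_pow_self
    have hb2 : d + 3 ≤ 2^(d+2) := Nat.lt_two_pow_self
    zify [hb1, hb2]
    push_cast
    ring

theorem totIter_top (sn : Nat) (h : 1 ≤ sn) : totIter sn sn = 2^sn - 1 := by
  obtain ⟨e, he⟩ : ∃ e, sn = e + 1 := ⟨sn - 1, by omega⟩
  subst he
  rw [show totIter (e+1) (e+1) = cntB (e + 1 - (e+1)) * (e+1) + totIter (e+1) e from rfl]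
  rw [show e + 1 - (e+1) = 0 from by omega]
  have hcnt : cntB 0 = 1 := rfl
  rw [hcnt]
  by_cases he0 : e = 0
  · subst he0; simp [totIter]
  · rw [totIter_closed (e+1) e (by omega)]
    rw [show e + 1 - 1 - e = 0 from by omega]
    have hb1 : e + 2 ≤ 2^(e+1) := Nat.lt_two_pow_self
    have hb2 : (2:Nat)^(e+1) = 2^e * 2 := pow_succ 2 e
    omega

theorem natCast_shr (m k : Nat) : ((m : Int) >>> k) = ((m >>> k : Nat) : Int) := by norm_cast
theorem shl_succ_shr (n : Nat) : ((1:Int) <<< (n+1)) >>> (1:Nat) = (1:Int) <<< n := by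
  rw [shl_one, shl_one, natCast_shr]
  norm_cast
  rw [Nat.shiftRight_eq_div_pow, pow_succ]
  omega

theorem cntB_cast (b : Nat) :
    ((cntB b : Nat) : Int) = (1:Int) <<< b - ((1:Int) <<< b) >>> (1:Nat) := by
  rw [shl_one, natCast_shr]
  unfold cntB
  have h1 : (2:Nat)^b >>> 1 = 2^b / 2 := by
    rw [Nat.shiftRight_eq_div_pow]
  rw [h1]
  have : 2^b/2 ≤ 2^b := Nat.div_le_self _ _
  omega

def tailB (sn : Nat) (t T : Int) (a : Int) : List Int :=
  (PySem.List.pyRange a (sn:Int) 1).flatMap (fun b =>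
    (PySem.List.pyRange (((1:Int) <<< b.toNat) >>> (1:Nat)) ((1:Int) <<< b.toNat) 1).flatMap
      (fun g => (PySem.List.pyRange 0 ((sn:Int) - b) 1).map (site (sn:Int) t T b g)))

theorem bunchesA (sn : Nat) (t T : Int) :
    ∀ (d : Nat), d ≤ sn →
    ∀ (gp : Int) (bs : Bool) (h0 : Int) (acc : List Int),
    (gp = 0 ∨ gp = (d:Int)) →
    ∃ b' bp' bs' gp' h',
      iterA (sn:Int) t T (totIter sn d)
        ⟨((sn - d : Nat) : Int),
         ((1:Int) <<< (sn - d)) - (((1:Int) <<< (sn - d)) >>> (1:Nat)), bs, gp, h0, acc⟩ =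
      ⟨b', bp', bs', gp', h', acc ++ tailB sn t T ((sn - d : Nat) : Int)⟩ := by
  intro d
  induction d with
  | zero =>
    intro _ gp bs h0 acc _
    refine ⟨((sn - 0 : Nat) : Int),
      ((1:Int) <<< (sn - 0)) - (((1:Int) <<< (sn - 0)) >>> (1:Nat)), bs, gp, h0, ?_⟩
    rw [show totIter sn 0 = 0 from rfl]
    unfold tailB
    rw [show ((sn - 0 : Nat) : Int) = (sn:Int) from by norm_num,
      PySem.List.pyRange_one_eq_nil (by omega), List.flatMap_nil, List.append_nil]
    rfl
  | succ d ih =>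
    intro hd gp bs h0 acc Hgp
    have hbn : sn - (d+1) < sn := by omega
    set bn : Nat := sn - (d+1) with hbndef
    have hsd : sn - d = bn + 1 := by omega
    -- the bunch to process
    have hc1 : 1 ≤ cntB bn := by
      unfold cntB
      have h2 : 1 ≤ (2:Nat)^bn := Nat.one_le_two_pow
      have h3 : 2^bn/2 < 2^bn := by
        exact Nat.div_lt_self (by omega) (by norm_num)
      omega
    obtain ⟨h', bs', hiter⟩ := bunchSegsA (sn:Int) t T bn (by exact_mod_cast hbn)
      (cntB bn) hc1 ((1:Int) <<< bn - (cntB bn : Int)) gp bs h0 acc rfl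
      (by rcases Hgp with h | h
          · exact Or.inl h
          · right; rw [h]; omega)
    rw [show totIter sn (d+1) = cntB bn * (d+1) + totIter sn d from rfl]
    have hcount : cntB bn * (d + 1) = cntB bn * ((sn:Int) - (bn:Int)).toNat := by
      congr 1
      omega
    rw [hcount, iterA_add]
    -- the entry state matches bunchSegsA's
    have hentry : (⟨((sn - (d+1) : Nat) : Int),
         ((1:Int) <<< (sn - (d+1))) - (((1:Int) <<< (sn - (d+1))) >>> (1:Nat)), bs, gp, h0, acc⟩ : StA)
        = ⟨(bn:Int), (1:Int) <<< bn - ((1:Int) <<< bn - ((cntB bn : Nat) : Int)), bs, gp, h0, acc⟩ := by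
      rw [cntB_cast]
      norm_num
      exact ⟨rfl, rfl⟩
    rw [hentry, hiter]
    -- now the remaining bunches via ih
    have hnext : (⟨(bn:Int) + 1, (1:Int) <<< bn, bs', 0, h',
        acc ++ (PySem.List.pyRange ((1:Int) <<< bn - ((cntB bn : Nat) : Int)) ((1:Int) <<< bn) 1).flatMap
          (fun g' => (PySem.List.pyRange 0 ((sn:Int) - bn) 1).map (site (sn:Int) t T bn g'))⟩ : StA)
        = ⟨((sn - d : Nat) : Int),
           ((1:Int) <<< (sn - d)) - (((1:Int) <<< (sn - d)) >>> (1:Nat)), bs', 0, h',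
           acc ++ (PySem.List.pyRange ((1:Int) <<< bn - ((cntB bn : Nat) : Int)) ((1:Int) <<< bn) 1).flatMap
             (fun g' => (PySem.List.pyRange 0 ((sn:Int) - bn) 1).map (site (sn:Int) t T bn g'))⟩ := by
      rw [hsd]
      have h1 : ((bn:Nat) + 1 : Int) = ((bn + 1 : Nat) : Int) := by push_cast; ring
      have h2 : ((1:Int) <<< (bn+1)) - (((1:Int) <<< (bn+1)) >>> (1:Nat)) = (1:Int) <<< bn := by
        rw [shl_succ_shr, shl_one, shl_one]
        push_cast [pow_succ]
        ring
      rw [h2]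
      norm_num
    rw [hnext]
    obtain ⟨b2, bp2, bs2, gp2, h2, hiter2⟩ := ih (by omega) 0 bs' h'
      (acc ++ (PySem.List.pyRange ((1:Int) <<< bn - ((cntB bn : Nat) : Int)) ((1:Int) <<< bn) 1).flatMap
        (fun g' => (PySem.List.pyRange 0 ((sn:Int) - bn) 1).map (site (sn:Int) t T bn g')))
      (Or.inl rfl)
    refine ⟨b2, bp2, bs2, gp2, h2, ?_⟩
    rw [hiter2]
    -- assemble the tail
    have hlow : (1:Int) <<< bn - ((cntB bn : Nat) : Int) = ((1:Int) <<< bn) >>> (1:Nat) := by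
      rw [cntB_cast]; ring
    have htail : tailB sn t T ((bn : Nat) : Int)
        = (PySem.List.pyRange ((1:Int) <<< bn - ((cntB bn : Nat) : Int)) ((1:Int) <<< bn) 1).flatMap
            (fun g' => (PySem.List.pyRange 0 ((sn:Int) - bn) 1).map (site (sn:Int) t T bn g'))
          ++ tailB sn t T ((sn - d : Nat) : Int) := by
      unfold tailB
      rw [PySem.List.pyRange_one_cons (by push_cast; omega), List.flatMap_cons,
          show ((bn : Nat) : Int) + 1 = ((sn - d : Nat) : Int) from by push_cast; omega]
      simp [Int.shiftLeft_natCast_right, Int.toNat_natCast, hlow]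
    rw [htail, List.append_assoc]

theorem bl_pow (k : Nat) : PySem.Int.bitLength ((2:Int) ^ k) = k + 1 := by
  induction k with
  | zero => rfl
  | succ k ih =>
    have h : ((2:Int)^(k+1)) = ((2^(k+1) : Nat) : Int) := by push_cast; ring
    rw [h, PySem.Int.bitLength_natCast]
    · have h2 : 2^(k+1)/2 = 2^k := by rw [pow_succ, Nat.mul_div_cancel _ (by norm_num)]
      rw [h2]
      have h3 : ((2^k : Nat) : Int) = (2:Int)^k := by push_cast; ring
      rw [h3, ih]
    · positivity

theorem foldl_const_stepA (s t T : Int) (l : List Int) (st : StA) :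
    l.foldl (fun st _ => stepA s t T st) st = iterA s t T l.length st := by
  induction l generalizing st with
  | nil => rfl
  | cons x xs ih => simpa [iterA] using ih (stepA s t T st)

theorem altB_flat (sn : Nat) (T : Int) (hsn : 1 ≤ sn) :
    steady_lookup_impl_alt ((2:Int)^sn) T
      = tailB sn ((PySem.Int.bitLength (T + 1) : Int) - sn) T 0 := by
  have h2 : (2:Int) ≤ 2^sn := by
    calc (2:Int) = 2^1 := by norm_num
    _ ≤ 2^sn := by exact pow_le_pow_right₀ (by norm_num) hsn
  have hs : ((sn + 1 : Nat) : Int) - 1 = (sn : Int) := by push_cast; ring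
  simp only [steady_lookup_impl_alt, if_neg (by omega : ¬ ((2:Int)^sn < 2)), bl_pow, hs]
  simp only [PySem.List.foldl_append_singleton_eq_map, PySem.List.foldl_append_eq_flatMap]
  unfold tailB site
  simp only [List.nil_append, Int.shiftLeft_natCast_right]

theorem main_pow (sn : Nat) (hsn : 1 ≤ sn) (T : Int) :
    steady_lookup_impl ((2:Int)^sn) T = steady_lookup_impl_alt ((2:Int)^sn) T := by
  have hpow : ((2:Int)^sn) = ((2^sn : Nat) : Int) := by push_cast; ring
  have h1n : 1 ≤ (2:Nat)^sn := Nat.one_le_two_pow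
  have hs : ((sn + 1 : Nat) : Int) - 1 = (sn : Int) := by push_cast; ring
  simp only [steady_lookup_impl, bl_pow, hs]
  rw [foldl_const_stepA, PySem.List.length_pyRange_one]
  have hlen : ((2:Int)^sn - 1 - 0).toNat = totIter sn sn := by
    rw [totIter_top sn hsn, hpow]
    omega
  rw [hlen]
  obtain ⟨b', bp', bs', gp', h', hiter⟩ := bunchesA sn ((PySem.Int.bitLength (T + 1) : Int) - sn) T
    sn (le_refl sn) (sn : Int) true 0 [] (Or.inr (by norm_num))
  rw [show (sn - sn : Nat) = 0 from by omega] at hiter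
  norm_num at hiter
  rw [show (1:Int) - (1:Int) >>> (1:Nat) = 1 from by decide] at hiter
  rw [hiter]
  rw [altB_flat sn T hsn]

-- ===== VERDICT (by name: the statement is the Claim_ definition above) =====
theorem steady_lookup_impl_spec : Claim_equal_steady_lookup_impl := by
  intro S T _hDom hPre
  unfold Spec_steady_lookup_impl
  rcases hPre with ⟨hT, hS⟩
  rcases hS with hS1 | hPow
  · -- S ≤ 1: A's loop is empty and B returns [] at its guard
    have hA : steady_lookup_impl S T = [] := by
      unfold steady_lookup_impl
      rw [PySem.List.pyRange_one_eq_nil (by omega)]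
      rfl
    have hB : steady_lookup_impl_alt S T = [] := by
      unfold steady_lookup_impl_alt
      rw [if_pos (by omega)]
    rw [hA, hB]
  · by_cases h2 : S < 2
    · have hA : steady_lookup_impl S T = [] := by
        unfold steady_lookup_impl
        rw [PySem.List.pyRange_one_eq_nil (by omega)]
        rfl
      have hB : steady_lookup_impl_alt S T = [] := by
        unfold steady_lookup_impl_alt
        rw [if_pos h2]
      rw [hA, hB]
    · have hsn : 1 ≤ Nat.log2 S.toNat := by
        by_contra h
        have : Nat.log2 S.toNat = 0 := by omega
        rw [this] at hPow
        omega
      rw [hPow]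
      exact main_pow _ hsn T
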